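-- pv_equiv track=rewrite | github.com/choib/telegram-mongo | src/agentic_handlers.py | safe_truncate
-- ===== SOURCE A (Python) =====
-- def safe_truncate(text: str, max_len: int, suffix: str = "\\.\\.\\. \\[truncated\\]") -> str:
--     """
--     Truncate a string while ensuring:
--     1. We don't end on a trailing backslash (breaking an escape sequence).
--     2. Any open markdown entities (bold, italic, code) are closed before the suffix.
--     """
--     if len(text) <= max_len:
--         return text
--
--     # Reserve space for suffix + potential closing tags (*, _, `, ```)
--     # 10 characters buffer for closing tags is plenty
--     limit = max_len - len(suffix) - 10
--
--     # Initial truncation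
--     target_pos = limit
--
--     # Ensure we don't end with an odd number of trailing backslashes
--     while target_pos > 0:
--         backslash_count = 0
--         p = target_pos - 1
--         while p >= 0 and text[p] == '\\':
--             backslash_count += 1
--             p -= 1
--
--         if backslash_count % 2 == 0:
--             break
--         target_pos -= 1
--
--     truncated = text[:target_pos]
--
--     # Track open entities in the truncated part
--     stack = []
--     i = 0
--     while i < len(truncated):
--         if i > 0 and truncated[i-1] == '\\':
--             # This character is escaped, check if the backslash itself is escaped
--             bs_count = 0
--             p = i - 1
--             while p >= 0 and truncated[p] == '\\':
--                 bs_count += 1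
--                 p -= 1
--             if bs_count % 2 != 0:
--                 # Escaped
--                 i += 1
--                 continue
--
--         char = truncated[i]
--         if char == '*':
--             if stack and stack[-1] == '*':
--                 stack.pop()
--             else:
--                 stack.append('*')
--         elif char == '_':
--             if stack and stack[-1] == '_':
--                 stack.pop()
--             else:
--                 stack.append('_')
--         elif char == '`':
--             if truncated[i:i+3] == '```':
--                 if stack and stack[-1] == '```':
--                     stack.pop()
--                 else:
--                     stack.append('```')
--                 i += 2
--             else:
--                 if stack and stack[-1] == '`':
--                     stack.pop()
--                 else:
--                     stack.append('`')
--         i += 1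
--
--     # Generate closing tags in reverse order
--     closing_tags = ""
--     while stack:
--         closing_tags += stack.pop()
--
--     return truncated + closing_tags + suffix
-- ===== SOURCE B (Python) =====
-- def safe_truncate(text: str, max_len: int, suffix: str = "\\.\\.\\. \\[truncated\\]") -> str:
--     """Single-pass truncation: escape state is tracked incrementally instead of
--     rescanning backslash runs, and the truncation point is fixed with one rstrip."""
--     if len(text) <= max_len:
--         return text
--     limit = max_len - len(suffix) - 10
--     target = limit
--     if limit > 0:
--         head = text[:limit]
--         if (limit - len(head.rstrip('\\'))) % 2 == 1:
--             target = limit - 1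
--     truncated = text[:target]
--     stack = []
--     esc = False
--     i = 0
--     n = len(truncated)
--     while i < n:
--         c = truncated[i]
--         if esc:
--             esc = False
--         elif c == '\\':
--             esc = True
--         elif c == '*' or c == '_':
--             if stack and stack[-1] == c:
--                 stack.pop()
--             else:
--                 stack.append(c)
--         elif c == '`':
--             if truncated[i:i+3] == '```':
--                 if stack and stack[-1] == '```':
--                     stack.pop()
--                 else:
--                     stack.append('```')
--                 i += 2
--             else:
--                 if stack and stack[-1] == '`':
--                     stack.pop()
--                 else:
--                     stack.append('`')
--         i += 1
--     return truncated + ''.join(reversed(stack)) + suffix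
-- ===== Notes on version B (the rewrite author's own statement) =====
-- stated objective: alternative
-- what changed: B finds the truncation point with one rstrip-based trailing-backslash parity check and scans the truncated text in a single pass carrying an incremental escape flag, instead of A's retry loop and per-character backward backslash rescans.
import Mathlib
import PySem

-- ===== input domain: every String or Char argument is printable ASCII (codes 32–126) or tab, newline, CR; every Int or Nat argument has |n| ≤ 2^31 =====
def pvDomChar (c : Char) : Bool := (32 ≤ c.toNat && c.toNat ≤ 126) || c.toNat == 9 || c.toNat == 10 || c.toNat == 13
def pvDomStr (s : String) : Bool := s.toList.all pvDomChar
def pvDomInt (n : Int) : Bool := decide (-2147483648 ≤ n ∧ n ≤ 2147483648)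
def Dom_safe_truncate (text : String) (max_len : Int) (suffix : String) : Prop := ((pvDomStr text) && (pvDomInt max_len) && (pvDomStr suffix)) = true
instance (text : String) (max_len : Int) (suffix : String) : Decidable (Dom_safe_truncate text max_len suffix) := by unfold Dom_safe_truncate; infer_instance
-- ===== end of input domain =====

-- B replaces A's repeated backward backslash rescans by one rstrip plus an incrementally
-- tracked escape flag in a single pass (objective: alternative single-pass formulation).


-- shared stack toggle: both Python sources contain the identical
-- "if stack and stack[-1] == tag: stack.pop() else: stack.append(tag)" snippet
def pvToggle (tag : List Char) (stack : List (List Char)) : List (List Char) :=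
  match stack with
  | t :: rest => if t = tag then rest else tag :: t :: rest
  | [] => [tag]

-- ===== PORT A =====
-- A's inner loop: "p = q; while p >= 0 and text[p] == '\\': count += 1; p -= 1"
def pvCountBS (cs : List Char) (p : Int) : Nat :=
  if h : 0 ≤ p ∧ PySem.List.pyGet? cs p = some '\\' then pvCountBS cs (p - 1) + 1 else 0
termination_by (p + 1).toNat
decreasing_by omega

-- A's outer loop: "while target_pos > 0: … if backslash_count % 2 == 0: break; target_pos -= 1"
def pvFindTarget (cs : List Char) (t : Int) : Int :=
  if h : 0 < t then
    if pvCountBS cs (t - 1) % 2 = 0 then t else pvFindTarget cs (t - 1)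
  else t
termination_by t.toNat
decreasing_by omega

-- A's entity scan: "while i < len(truncated): …" with a backward backslash recount at each
-- escaped-character check; stack head = Python stack top, entries are the tag strings
def pvScanA (cs : List Char) (i : Nat) (stack : List (List Char)) : List (List Char) :=
  if h : i < cs.length then
    if 0 < i ∧ PySem.List.pyGet? cs ((i : Int) - 1) = some '\\' ∧ pvCountBS cs ((i : Int) - 1) % 2 ≠ 0 then
      pvScanA cs (i + 1) stack            -- escaped: i += 1; continue
    else
      let c := cs[i]
      if c = '*' then pvScanA cs (i + 1) (pvToggle ['*'] stack)
      else if c = '_' then pvScanA cs (i + 1) (pvToggle ['_'] stack)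
      else if c = '`' then
        if PySem.List.slice cs (some (i : Int)) (some ((i : Int) + 3)) = ['`', '`', '`'] then
          pvScanA cs (i + 3) (pvToggle ['`', '`', '`'] stack)   -- i += 2 then i += 1
        else pvScanA cs (i + 1) (pvToggle ['`'] stack)
      else pvScanA cs (i + 1) stack
  else stack
termination_by cs.length - i

def safe_truncate (text : String) (max_len : Int) (suffix : String) : String :=
  if PySem.Str.len text ≤ max_len then text
  else
    let cs := text.toList
    let limit := max_len - PySem.Str.len suffix - 10
    let target := pvFindTarget cs limit
    let truncated := PySem.List.slice cs none (some target)     -- text[:target_pos]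
    let stack := pvScanA truncated 0 []
    -- "while stack: closing_tags += stack.pop()" = concatenation from the top
    String.ofList (truncated ++ stack.flatten ++ suffix.toList)

-- ===== PORT B =====
-- B's single pass: esc is the escape state carried incrementally, no recount
def pvScanB (cs : List Char) (i : Nat) (esc : Bool) (stack : List (List Char)) : List (List Char) :=
  if h : i < cs.length then
    let c := cs[i]
    if esc then pvScanB cs (i + 1) false stack
    else if c = '\\' then pvScanB cs (i + 1) true stack
    else if c = '*' ∨ c = '_' then pvScanB cs (i + 1) false (pvToggle [c] stack)
    else if c = '`' then
      if PySem.List.slice cs (some (i : Int)) (some ((i : Int) + 3)) = ['`', '`', '`'] then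
        pvScanB cs (i + 3) false (pvToggle ['`', '`', '`'] stack)
      else pvScanB cs (i + 1) false (pvToggle ['`'] stack)
    else pvScanB cs (i + 1) false stack
  else stack
termination_by cs.length - i

def safe_truncate_alt (text : String) (max_len : Int) (suffix : String) : String :=
  if PySem.Str.len text ≤ max_len then text
  else
    let cs := text.toList
    let limit := max_len - PySem.Str.len suffix - 10
    let target :=
      if 0 < limit then
        let head := PySem.List.slice cs none (some limit)       -- text[:limit]
        -- head.rstrip('\\') ported by hand, exact: drop trailing '\\' characters
        let stripped := (head.reverse.dropWhile (· = '\\')).reverse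
        if PySem.Int.mod (limit - (stripped.length : Int)) 2 = 1 then limit - 1 else limit
      else limit
    let truncated := PySem.List.slice cs none (some target)
    let stack := pvScanB truncated 0 false []
    String.ofList (truncated ++ stack.flatten ++ suffix.toList)

-- ===== PRECONDITION & SPEC =====
def Spec_safe_truncate (text : String) (max_len : Int) (suffix : String) (out : String) : Prop := out = safe_truncate_alt text max_len suffix
instance (text : String) (max_len : Int) (suffix : String) (out : String) : Decidable (Spec_safe_truncate text max_len suffix out) := by unfold Spec_safe_truncate; infer_instance

-- ===== CLAIM (what is proved, stated in full; the proofs are below) =====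
def Claim_equal_safe_truncate : Prop := ∀ (text : String) (max_len : Int) (suffix : String), Dom_safe_truncate text max_len suffix → Spec_safe_truncate text max_len suffix (safe_truncate text max_len suffix)

-- ===== LEMMAS AND PROOFS =====

-- unfolding pvCountBS at an in-range index
lemma pvCountBS_step (cs : List Char) (j : Nat) (hj : j < cs.length) :
    pvCountBS cs (j : Int) = if cs[j] = '\\' then pvCountBS cs ((j : Int) - 1) + 1 else 0 := by
  rw [pvCountBS]
  simp [PySem.List.pyGet?_natCast, List.getElem?_eq_getElem hj]

lemma pvCountBS_neg (cs : List Char) (p : Int) (hp : p < 0) : pvCountBS cs p = 0 := by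
  rw [pvCountBS]; simp; omega

-- odd count forces a backslash at the index (and the predecessor count one less)
lemma pvCountBS_pos (cs : List Char) (p : Int) (h : pvCountBS cs p ≠ 0) :
    0 ≤ p ∧ PySem.List.pyGet? cs p = some '\\' ∧ pvCountBS cs p = pvCountBS cs (p - 1) + 1 := by
  by_cases hc : 0 ≤ p ∧ PySem.List.pyGet? cs p = some '\\'
  · refine ⟨hc.1, hc.2, ?_⟩
    rw [pvCountBS, dif_pos hc]
  · exact absurd (by rw [pvCountBS, dif_neg hc]) h

-- A's target loop runs at most one step: it returns t, or t-1 when the trailing run is odd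
lemma pvFindTarget_eq (cs : List Char) (t : Int) :
    pvFindTarget cs t = if 0 < t ∧ pvCountBS cs (t - 1) % 2 = 1 then t - 1 else t := by
  rw [pvFindTarget]
  by_cases ht : 0 < t
  · rw [dif_pos ht]
    by_cases he : pvCountBS cs (t - 1) % 2 = 0
    · have hc : ¬ (0 < t ∧ pvCountBS cs (t - 1) % 2 = 1) := fun h => by omega
      rw [if_pos he, if_neg hc]
    · have hodd : pvCountBS cs (t - 1) % 2 = 1 := by omega
      have hne : pvCountBS cs (t - 1) ≠ 0 := by omega
      obtain ⟨hp, hget, hstep⟩ := pvCountBS_pos cs (t - 1) hne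
      have heven : pvCountBS cs (t - 1 - 1) % 2 = 0 := by omega
      rw [if_neg he, if_pos (⟨ht, hodd⟩ : 0 < t ∧ pvCountBS cs (t - 1) % 2 = 1)]
      rw [pvFindTarget]
      by_cases ht1 : 0 < t - 1
      · rw [dif_pos ht1, if_pos heven]
      · rw [dif_neg ht1]
  · rw [dif_neg ht, if_neg (fun h => ht h.1)]

-- trailing-backslash count of cs.take n equals A's backward count at n-1
lemma pvCountBS_take (cs : List Char) (n : Nat) (hn : n ≤ cs.length) :
    pvCountBS cs ((n : Int) - 1) = ((cs.take n).reverse.takeWhile (· = '\\')).length := by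
  induction n with
  | zero => simp [pvCountBS_neg cs (-1) (by omega)]
  | succ m ih =>
    have hm : m < cs.length := by omega
    rw [show ((m + 1 : Nat) : Int) - 1 = (m : Int) by omega]
    rw [pvCountBS_step cs m hm]
    rw [List.take_add_one, List.getElem?_eq_getElem hm]
    rw [List.reverse_append]
    simp only [Option.toList_some, List.reverse_cons, List.reverse_nil, List.nil_append,
      List.singleton_append, List.takeWhile_cons]
    by_cases hc : cs[m] = '\\'
    · simp [hc, ih (by omega)]
    · simp [hc]

-- the two scans agree when esc carries the parity of the trailing backslash run
lemma scan_eq (cs : List Char) : ∀ n i stack, cs.length - i ≤ n →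
    pvScanA cs i stack = pvScanB cs i (decide (pvCountBS cs ((i : Int) - 1) % 2 = 1)) stack := by
  intro n
  induction n with
  | zero =>
    intro i stack hle
    rw [pvScanA, pvScanB]
    have : ¬ i < cs.length := by omega
    simp [this]
  | succ m ih =>
    intro i stack hle
    rw [pvScanA, pvScanB]
    by_cases hi : i < cs.length
    · simp only [hi, dif_pos]
      by_cases hodd : pvCountBS cs ((i : Int) - 1) % 2 = 1
      · -- escaped: both skip the character
        have hne : pvCountBS cs ((i : Int) - 1) ≠ 0 := by omega
        obtain ⟨hp, hget, _⟩ := pvCountBS_pos cs ((i : Int) - 1) hne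
        have hA : 0 < i ∧ PySem.List.pyGet? cs ((i : Int) - 1) = some '\\' ∧
            pvCountBS cs ((i : Int) - 1) % 2 ≠ 0 := ⟨by omega, hget, by omega⟩
        have hb : decide (pvCountBS cs (((i + 1 : Nat) : Int) - 1) % 2 = 1) = false := by
          rw [show ((i + 1 : Nat) : Int) - 1 = (i : Int) by omega, pvCountBS_step cs i hi]
          by_cases hc : cs[i] = '\\' <;> simp [hc] <;> omega
        rw [if_pos hA,
          if_pos (show decide (pvCountBS cs ((i : Int) - 1) % 2 = 1) = true by simpa using hodd)]
        rw [ih (i + 1) stack (by omega), hb]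
      · -- not escaped
        have hA : ¬ (0 < i ∧ PySem.List.pyGet? cs ((i : Int) - 1) = some '\\' ∧
            pvCountBS cs ((i : Int) - 1) % 2 ≠ 0) := by
          rintro ⟨_, _, h2⟩; omega
        rw [if_neg hA,
          if_neg (show ¬ decide (pvCountBS cs ((i : Int) - 1) % 2 = 1) = true by simpa using hodd)]
        have hstep1 : cs[i] ≠ '\\' →
            decide (pvCountBS cs (((i + 1 : Nat) : Int) - 1) % 2 = 1) = false := by
          intro h1
          rw [show ((i + 1 : Nat) : Int) - 1 = (i : Int) by omega, pvCountBS_step cs i hi]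
          simp [h1]
        by_cases hbs : cs[i] = '\\'
        · -- backslash: A pushes nothing, B sets esc
          have hb : decide (pvCountBS cs (((i + 1 : Nat) : Int) - 1) % 2 = 1) = true := by
            rw [show ((i + 1 : Nat) : Int) - 1 = (i : Int) by omega, pvCountBS_step cs i hi]
            simp [hbs]; omega
          have h1 : cs[i] ≠ '*' := by rw [hbs]; decide
          have h2 : cs[i] ≠ '_' := by rw [hbs]; decide
          have h3 : cs[i] ≠ '`' := by rw [hbs]; decide
          rw [if_neg h1, if_neg h2, if_neg h3, if_pos hbs]
          rw [ih (i + 1) stack (by omega), hb]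
        · by_cases hst : cs[i] = '*'
          · rw [if_pos hst, if_neg hbs, if_pos (Or.inl hst : cs[i] = '*' ∨ cs[i] = '_'), hst]
            rw [ih (i + 1) (pvToggle ['*'] stack) (by omega), hstep1 hbs]
          · by_cases hus : cs[i] = '_'
            · rw [if_neg hst, if_pos hus, if_neg hbs, if_pos (Or.inr hus : cs[i] = '*' ∨ cs[i] = '_'), hus]
              rw [ih (i + 1) (pvToggle ['_'] stack) (by omega), hstep1 hbs]
            · have hor : ¬ (cs[i] = '*' ∨ cs[i] = '_') := by simp [hst, hus]
              by_cases hbt : cs[i] = '`'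
              · rw [if_neg hst, if_neg hus, if_pos hbt, if_neg hbs, if_neg hor, if_pos hbt]
                by_cases htr : PySem.List.slice cs (some (i : Int)) (some ((i : Int) + 3)) = ['`', '`', '`']
                · have hdt : (cs.drop i).take 3 = ['`', '`', '`'] := by
                    rw [← PySem.List.slice_natCast_add (xs := cs) (j := i) (n := 3)]
                    exact_mod_cast htr
                  have hlen : i + 3 ≤ cs.length := by
                    have h3 := congrArg List.length hdt
                    simp [List.length_take, List.length_drop] at h3
                    omega
                  have hc2 : cs[i + 2]'(by omega) = '`' := by
                    have h2 : (cs.drop i)[2]'(by simp [List.length_drop]; omega) = '`' := by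
                      have := congrArg (fun l => l[2]?) hdt
                      simpa [List.getElem?_take,
                        List.getElem?_eq_getElem (show 2 < (cs.drop i).length by simp [List.length_drop]; omega)] using this
                    simpa [List.getElem_drop] using h2
                  have hb : decide (pvCountBS cs (((i + 3 : Nat) : Int) - 1) % 2 = 1) = false := by
                    rw [show ((i + 3 : Nat) : Int) - 1 = ((i + 2 : Nat) : Int) by omega,
                      pvCountBS_step cs (i + 2) (by omega)]
                    simp [hc2]
                  rw [if_pos htr, if_pos htr]
                  rw [ih (i + 3) (pvToggle ['`', '`', '`'] stack) (by omega), hb]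
                · rw [if_neg htr, if_neg htr]
                  rw [ih (i + 1) (pvToggle ['`'] stack) (by omega), hstep1 hbs]
              · rw [if_neg hst, if_neg hus, if_neg hbt, if_neg hbs, if_neg hor, if_neg hbt]
                rw [ih (i + 1) stack (by omega), hstep1 hbs]
    · simp [hi]

-- A's target search equals B's rstrip-based parity fix
lemma target_eq (cs : List Char) (limit : Int) (hlim : limit ≤ (cs.length : Int)) :
    pvFindTarget cs limit =
      (if 0 < limit then
        (if PySem.Int.mod (limit - ((((PySem.List.slice cs none (some limit)).reverse.dropWhile (· = '\\')).reverse).length : Int)) 2 = 1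
         then limit - 1 else limit)
       else limit) := by
  rw [pvFindTarget_eq]
  by_cases hl : 0 < limit
  · have hslice : PySem.List.slice cs none (some limit) = cs.take limit.toNat :=
      PySem.List.slice_to cs (by omega)
    set n := limit.toNat with hn
    have hnl : n ≤ cs.length := by omega
    have hcnt := pvCountBS_take cs n hnl
    have hcast : ((n : Int)) - 1 = limit - 1 := by omega
    rw [hcast] at hcnt
    set tw := ((cs.take n).reverse.takeWhile (· = '\\')).length with htw
    have hdw : (((cs.take n).reverse.dropWhile (· = '\\')).reverse).length = n - tw := by
      have h1 : ((cs.take n).reverse.takeWhile (· = '\\')) ++ ((cs.take n).reverse.dropWhile (· = '\\')) = (cs.take n).reverse :=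
        List.takeWhile_append_dropWhile
      have h2 := congrArg List.length h1
      simp only [List.length_append, List.length_reverse, List.length_take] at h2
      simp only [List.length_reverse]
      omega
    have htwle : tw ≤ n := by
      have := (List.takeWhile_prefix (p := (· = '\\')) (l := (cs.take n).reverse)).length_le
      simpa [List.length_take, hnl] using this
    have hdiff : limit - (((((cs.take n)).reverse.dropWhile (· = '\\')).reverse).length : Int) = (tw : Int) := by
      rw [hdw]; omega
    rw [hslice, hdiff]
    have hmod : PySem.Int.mod (tw : Int) 2 = (tw : Int) % 2 :=
      PySem.Int.mod_eq_emod_of_pos (by omega)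
    rw [hmod, hcnt]
    by_cases hp : tw % 2 = 1
    · have : (tw : Int) % 2 = 1 := by omega
      simp [hl, hp, this]
    · have : ¬ (tw : Int) % 2 = 1 := by omega
      simp [hl, hp, this]
  · simp [hl]

-- ===== VERDICT (by name: the statement is the Claim_ definition above) =====
theorem safe_truncate_spec : Claim_equal_safe_truncate := by
  intro text max_len suffix _
  unfold Spec_safe_truncate safe_truncate safe_truncate_alt
  by_cases hlen : PySem.Str.len text ≤ max_len
  · rw [if_pos hlen, if_pos hlen]
  · rw [if_neg hlen, if_neg hlen]
    simp only []
    have hlim : max_len - PySem.Str.len suffix - 10 ≤ (text.toList.length : Int) := by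
      rw [PySem.Str.len_eq] at hlen
      rw [PySem.Str.len_eq]
      have : (0 : Int) ≤ (suffix.toList.length : Int) := by positivity
      omega
    rw [target_eq text.toList _ hlim]
    have h0 : decide (pvCountBS (PySem.List.slice text.toList none
        (some (if 0 < max_len - PySem.Str.len suffix - 10 then
          (if PySem.Int.mod (max_len - PySem.Str.len suffix - 10 -
                ((((PySem.List.slice text.toList none (some (max_len - PySem.Str.len suffix - 10))).reverse.dropWhile
                    (· = '\\')).reverse).length : Int)) 2 = 1
           then max_len - PySem.Str.len suffix - 10 - 1 else max_len - PySem.Str.len suffix - 10)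
         else max_len - PySem.Str.len suffix - 10))) (((0 : Nat) : Int) - 1) % 2 = 1) = false := by
      rw [show (((0 : Nat) : Int) - 1) = (-1 : Int) by omega, pvCountBS_neg _ (-1) (by omega)]
      simp
    rw [scan_eq _ _ 0 [] (le_refl _), h0]
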